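-- pv_equiv track=rewrite | github.com/CSIRO-enviro-informatics/modsim-keywords | keywordextract.py | trimoutjunk
-- ===== SOURCE A (Python) =====
-- def trimoutjunk(text):
--     # -this function cleans out junk from keywords (special cases, whitespace)
--     # Inputs:
--     # -  [text : string] keywords to be cleaned
--     # Output:
--     # - [data : string] clearned keywords
--
--     end = []
--     #special cases
--     cases = [' 22nd international congress', "1. Introduction", "1.0 introduction"]
--     for case in cases:
--         if case.lower() in text.lower():
--             end.append(text.lower().find(case.lower()))
--
--     if len(end) is not 0:
--         text = text[0:min(end)]
--
--     #trim white space
--     cases = ['  ', '   ', '\t', '\n']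
--     for case in cases:
--         text.replace(case, '')
--
--     return text
-- ===== SOURCE B (Python) =====
-- def trimoutjunk(text):
--     # single left-to-right scan: truncate at the first position where any junk phrase starts
--     low = text.lower()
--     phrases = (' 22nd international congress', '1. introduction', '1.0 introduction')
--     i = next((i for i in range(len(low)) if low.startswith(phrases, i)), None)
--     return text if i is None else text[:i]
-- ===== Notes on version B (the rewrite author's own statement) =====
-- stated objective: alternative
-- what changed: A runs three separate lowercase substring-find passes, collects the hit indices in a list and truncates at min(); B makes a single left-to-right scan over the lowered text and truncates at the first position where any of the three junk phrases starts (str.startswith with a tuple), dropping A's dead whitespace-replace loop whose results are discarded.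
import Mathlib
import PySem

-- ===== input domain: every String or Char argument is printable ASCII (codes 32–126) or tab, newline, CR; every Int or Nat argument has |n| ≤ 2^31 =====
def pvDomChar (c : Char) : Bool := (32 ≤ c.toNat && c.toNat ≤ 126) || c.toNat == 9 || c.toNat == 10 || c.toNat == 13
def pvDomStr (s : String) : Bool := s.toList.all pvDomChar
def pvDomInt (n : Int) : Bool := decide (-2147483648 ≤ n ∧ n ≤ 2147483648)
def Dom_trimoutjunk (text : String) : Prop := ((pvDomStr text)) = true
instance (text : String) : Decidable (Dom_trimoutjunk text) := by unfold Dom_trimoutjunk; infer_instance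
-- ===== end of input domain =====

-- B replaces A's three lowercase `find` passes + min() with one left-to-right scan that
-- truncates at the first position where any junk phrase starts (objective: alternative/idiomatic).
-- A's trailing whitespace-replace loop discards its results in Python (no effect); it is ported as a no-op.

-- ===== PORT A =====
def trimoutjunk (text : String) : String :=
  -- end = []; for case in cases: if case.lower() in text.lower(): end.append(text.lower().find(case.lower()))
  let ends : List Int :=
    [" 22nd international congress", "1. Introduction", "1.0 introduction"].foldl
      (fun acc c =>
        if PySem.Str.isIn (PySem.Str.lower c) (PySem.Str.lower text) then
          acc ++ [PySem.Str.find (PySem.Str.lower text) (PySem.Str.lower c)]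
        else acc) []
  -- if len(end) is not 0: text = text[0:min(end)]
  let text1 :=
    if ends.length ≠ 0 then
      match PySem.List.min? ends (fun x => x) with
      | some m => PySem.Str.slice text (some 0) (some m)
      | none => text
    else text
  -- the `text.replace(case, '')` loop discards its results (str.replace is pure); no effect
  text1

-- ===== PORT B =====
def pvPhrases : List (List Char) :=
  [" 22nd international congress".toList, "1. introduction".toList, "1.0 introduction".toList]

-- i = next((i for i in range(len(low)) if low.startswith(phrases, i)), None)
def pvScan : List Char → Option Nat
  | [] => none
  | c :: t =>
    if pvPhrases.any (fun p => PySem.Chars.startswith (c :: t) p) then some 0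
    else (pvScan t).map (· + 1)

def trimoutjunk_alt (text : String) : String :=
  match pvScan (PySem.Chars.lower text.toList) with
  | none => text
  | some i => PySem.Str.slice text none (some (i : Int))

-- ===== PRECONDITION & SPEC =====
def Spec_trimoutjunk (text : String) (out : String) : Prop := out = trimoutjunk_alt text
instance (text : String) (out : String) : Decidable (Spec_trimoutjunk text out) := by unfold Spec_trimoutjunk; infer_instance

-- ===== CLAIM (what is proved, stated in full; the proofs are below) =====
def Claim_equal_trimoutjunk : Prop := ∀ (text : String), Dom_trimoutjunk text → Spec_trimoutjunk text (trimoutjunk text)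

-- ===== LEMMAS AND PROOFS =====

-- "some junk phrase starts at position k of L"
def pvMatchAt (L : List Char) (k : Nat) : Prop := ∃ p ∈ pvPhrases, p <+: L.drop k

theorem pvPhrases_ne_nil : ∀ p ∈ pvPhrases, p ≠ [] := by decide

theorem pvMatchAt_cons (c : Char) (t : List Char) (k : Nat) :
    pvMatchAt (c :: t) (k + 1) ↔ pvMatchAt t k := by
  simp [pvMatchAt]

theorem pvScan_none {s : List Char} (h : pvScan s = none) : ∀ k, ¬ pvMatchAt s k := by
  induction s with
  | nil =>
    intro k ⟨p, hp, hpre⟩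
    simp at hpre
    exact pvPhrases_ne_nil p hp hpre
  | cons c t ih =>
    intro k
    rw [pvScan] at h
    split at h
    · simp at h
    · rename_i hany
      have ht : pvScan t = none := by
        cases hts : pvScan t <;> simp [hts] at h ⊢
      intro hm
      match k with
      | 0 =>
        obtain ⟨p, hp, hpre⟩ := hm
        simp only [List.any_eq_true, not_exists, not_and] at hany
        exact hany p hp ((PySem.Chars.startswith_iff _ _).mpr (by simpa using hpre))
      | k + 1 => exact ih ht k ((pvMatchAt_cons c t k).mp hm)

theorem pvScan_some {s : List Char} {k : Nat} (h : pvScan s = some k) :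
    pvMatchAt s k ∧ ∀ j < k, ¬ pvMatchAt s j := by
  induction s generalizing k with
  | nil => simp [pvScan] at h
  | cons c t ih =>
    rw [pvScan] at h
    split at h
    · rename_i hany
      obtain rfl : k = 0 := by simpa using h.symm
      refine ⟨?_, by omega⟩
      simp only [List.any_eq_true] at hany
      obtain ⟨p, hp, hsw⟩ := hany
      exact ⟨p, hp, by simpa using (PySem.Chars.startswith_iff _ _).mp hsw⟩
    · rename_i hany
      cases hts : pvScan t with
      | none => simp [hts] at h
      | some k' =>
        rw [hts] at h
        simp at h
        obtain ⟨hm, hmin⟩ := ih hts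
        constructor
        · rw [← h]; exact (pvMatchAt_cons c t k').mpr hm
        · intro j hj
          match j with
          | 0 =>
            intro ⟨p, hp, hpre⟩
            simp only [List.any_eq_true, not_exists, not_and] at hany
            exact hany p hp ((PySem.Chars.startswith_iff _ _).mpr (by simpa using hpre))
          | j + 1 =>
            rw [pvMatchAt_cons]
            exact hmin j (by omega)

-- A's accumulation step on the char-list side
def pvStep (L : List Char) (acc : List Int) (p : List Char) : List Int :=
  if PySem.Chars.isIn p L then acc ++ [PySem.Chars.find L p] else acc

-- A's `end` list, phrased on the char-list side
def pvEnds (L : List Char) : List Int := pvPhrases.foldl (pvStep L) []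

theorem foldl_pvStep_mem (L : List Char) (ps : List (List Char)) :
    ∀ (acc : List Int) (m : Int), m ∈ ps.foldl (pvStep L) acc ↔
      m ∈ acc ∨ ∃ p ∈ ps, PySem.Chars.isIn p L = true ∧ m = PySem.Chars.find L p := by
  induction ps with
  | nil => intro acc m; simp
  | cons p ps ih =>
    intro acc m
    rw [List.foldl_cons, ih]
    by_cases hin : PySem.Chars.isIn p L = true <;>
      simp [pvStep, hin] <;> tauto

theorem pvEnds_mem {L : List Char} {m : Int} :
    m ∈ pvEnds L ↔ ∃ p ∈ pvPhrases, PySem.Chars.isIn p L = true ∧ m = PySem.Chars.find L p := by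
  rw [pvEnds, foldl_pvStep_mem]
  simp

-- A's ends list equals pvEnds of the lowered char list (bridges the Str wrappers + literal lowering)
theorem ends_eq (text : String) :
    [" 22nd international congress", "1. Introduction", "1.0 introduction"].foldl
      (fun acc c =>
        if PySem.Str.isIn (PySem.Str.lower c) (PySem.Str.lower text) then
          acc ++ [PySem.Str.find (PySem.Str.lower text) (PySem.Str.lower c)]
        else acc) ([] : List Int)
    = pvEnds (PySem.Chars.lower text.toList) := by
  have h1 : PySem.Chars.lower " 22nd international congress".toList
      = " 22nd international congress".toList := by decide
  have h2 : PySem.Chars.lower "1. Introduction".toList = "1. introduction".toList := by decide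
  have h3 : PySem.Chars.lower "1.0 introduction".toList = "1.0 introduction".toList := by decide
  simp only [pvEnds, pvStep, pvPhrases, List.foldl, PySem.Str.isIn, PySem.Str.find,
    PySem.Str.toList_lower]
  rw [h1, h2, h3]

-- ===== VERDICT (by name: the statement is the Claim_ definition above) =====
theorem trimoutjunk_spec : Claim_equal_trimoutjunk := by
  intro text _
  unfold Spec_trimoutjunk trimoutjunk trimoutjunk_alt
  rw [ends_eq]
  set L := PySem.Chars.lower text.toList with hL
  by_cases hE : pvEnds L = []
  · -- no phrase present: both sides return text
    rw [hE]
    simp only [List.length_nil, ne_eq, not_true_eq_false, if_false]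
    cases hs : pvScan L with
    | none => rfl
    | some k =>
      exfalso
      obtain ⟨p, hp, hpre⟩ := (pvScan_some hs).1
      have hin : PySem.Chars.isIn p L = true :=
        (PySem.Chars.exists_prefix_drop_iff_isIn _ _).mp ⟨k, hpre⟩
      have : PySem.Chars.find L p ∈ pvEnds L := pvEnds_mem.mpr ⟨p, hp, hin, rfl⟩
      simp [hE] at this
  · -- some phrase present
    cases hmin : PySem.List.min? (pvEnds L) (fun x => x) with
    | none => exact absurd ((PySem.List.min?_eq_none_iff _ _).mp hmin) hE
    | some m =>
      have hmem : m ∈ pvEnds L := PySem.List.min?_mem hmin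
      have hisMin : ∀ y ∈ pvEnds L, m ≤ y := PySem.List.min?_isMin hmin
      obtain ⟨p, hp, hin, hmfind⟩ := pvEnds_mem.mp hmem
      have hfind_nonneg : 0 ≤ PySem.Chars.find L p := by
        rw [PySem.Chars.find_nonneg_iff]
        exact (PySem.Chars.isIn_iff_infix _ _).mp hin
      have hm0 : 0 ≤ m := hmfind ▸ hfind_nonneg
      -- m.toNat is a match position
      have hmatch_m : pvMatchAt L m.toNat := by
        obtain ⟨hpre, _⟩ := PySem.Chars.find_spec (s := L) (sub := p) hfind_nonneg
        exact ⟨p, hp, by rw [hmfind]; exact hpre⟩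
      -- pvScan L = some m.toNat
      have hscan : pvScan L = some m.toNat := by
        cases hs : pvScan L with
        | none => exact absurd hmatch_m (pvScan_none hs m.toNat)
        | some k =>
          obtain ⟨hmk, hkmin⟩ := pvScan_some hs
          have hk_le : k ≤ m.toNat := by
            by_contra hlt
            exact hkmin m.toNat (Nat.lt_of_not_le hlt) hmatch_m
          have hm_le : m.toNat ≤ k := by
            obtain ⟨q, hq, hqpre⟩ := hmk
            have hqin : PySem.Chars.isIn q L = true :=
              (PySem.Chars.exists_prefix_drop_iff_isIn _ _).mp ⟨k, hqpre⟩
            have hq_nonneg : 0 ≤ PySem.Chars.find L q := by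
              rw [PySem.Chars.find_nonneg_iff]
              exact (PySem.Chars.isIn_iff_infix _ _).mp hqin
            obtain ⟨_, hqmin⟩ := PySem.Chars.find_spec (s := L) (sub := q) hq_nonneg
            have hfq_le : (PySem.Chars.find L q).toNat ≤ k := by
              by_contra hlt
              exact hqmin k (Nat.lt_of_not_le hlt) hqpre
            have hm_le_fq : m ≤ PySem.Chars.find L q := hisMin _ (pvEnds_mem.mpr ⟨q, hq, hqin, rfl⟩)
            omega
          exact congrArg _ (Nat.le_antisymm hk_le hm_le)
      rw [hscan]
      -- both slices: text[0:m] = text[:m.toNat]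
      have hlen : ((pvEnds L).length = 0) = False := by simp [hE]
      simp only [hmin, hlen, ne_eq, not_false_eq_true, if_true]
      apply String.toList_inj.mp
      simp only [PySem.Str.toList_slice, PySem.Chars.slice_eq_listSlice]
      rw [PySem.List.slice_toNat text.toList (le_refl (0 : Int)) hm0,
          PySem.List.slice_to text.toList (by omega : (0 : Int) ≤ (m.toNat : Int))]
      simp
      omega
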